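-- pv_equiv track=rewrite | github.com/calebevans/flare | src/flare/voice_handler.py | _extract_spoken_summary
-- ===== SOURCE A (Python) =====
-- def _extract_spoken_summary(rca: str) -> str:
--     """Extract the SPOKEN SUMMARY field from the RCA for voice delivery.
--
--     Falls back to the SUMMARY field, then to a generic message if
--     neither is found.
--     """
--     for line in rca.splitlines():
--         if line.strip().startswith("SPOKEN SUMMARY:"):
--             return line.split(":", 1)[1].strip()
--     for line in rca.splitlines():
--         if line.strip().startswith("SUMMARY:"):
--             return line.split(":", 1)[1].strip()
--     return "An incident has been detected. Check your email for details."
-- ===== SOURCE B (Python) =====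
-- def _extract_spoken_summary(rca: str) -> str:
--     """Single pass: return the first SPOKEN SUMMARY line immediately; remember
--     the first SUMMARY line as a fallback; generic message if neither appears."""
--     fallback = None
--     for line in rca.splitlines():
--         stripped = line.strip()
--         if stripped.startswith("SPOKEN SUMMARY:"):
--             return line.split(":", 1)[1].strip()
--         if fallback is None and stripped.startswith("SUMMARY:"):
--             fallback = line.split(":", 1)[1].strip()
--     if fallback is not None:
--         return fallback
--     return "An incident has been detected. Check your email for details."
-- ===== Notes on version B (the rewrite author's own statement) =====
-- stated objective: simpler
-- what changed: Replaces A's two full scans over rca.splitlines() (one for SPOKEN SUMMARY, then one for SUMMARY) with a single pass that returns a SPOKEN SUMMARY line immediately and remembers the first SUMMARY line as a fallback.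
import Mathlib
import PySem

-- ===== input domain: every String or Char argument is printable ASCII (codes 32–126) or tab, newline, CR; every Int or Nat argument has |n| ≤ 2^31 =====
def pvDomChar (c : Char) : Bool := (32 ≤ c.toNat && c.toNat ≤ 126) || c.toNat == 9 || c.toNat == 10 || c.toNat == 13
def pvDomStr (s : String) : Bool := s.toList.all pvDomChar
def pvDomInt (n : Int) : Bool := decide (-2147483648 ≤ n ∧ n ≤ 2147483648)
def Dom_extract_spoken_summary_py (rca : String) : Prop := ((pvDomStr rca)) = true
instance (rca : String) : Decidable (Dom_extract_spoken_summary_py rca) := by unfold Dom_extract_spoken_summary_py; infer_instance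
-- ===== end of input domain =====

-- B is a single pass over the lines with a remembered fallback, replacing A's two scans; objective: simpler.

-- ===== PORT A =====
-- line.split(":", 1)[1].strip(): in both programs this runs only when the stripped line
-- starts with "…SUMMARY:", so the ':' is present and index 1 exists; the `_ => ""` arm is dead.
def pvAfterColon (line : String) : String :=
  match PySem.Str.splitMax? line ":" 1 with
  | some (_ :: rest :: _) => PySem.Str.strip rest
  | _ => ""

def pvDefaultMsg : String := "An incident has been detected. Check your email for details."

-- first loop of A: first line whose strip starts with "SPOKEN SUMMARY:"
def pvALoop1 : List String → Option String
  | [] => none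
  | l :: ls =>
    if PySem.Str.startswith (PySem.Str.strip l) "SPOKEN SUMMARY:" then some (pvAfterColon l)
    else pvALoop1 ls

-- second loop of A: first line whose strip starts with "SUMMARY:"
def pvALoop2 : List String → Option String
  | [] => none
  | l :: ls =>
    if PySem.Str.startswith (PySem.Str.strip l) "SUMMARY:" then some (pvAfterColon l)
    else pvALoop2 ls

def extract_spoken_summary_py (rca : String) : String :=
  match pvALoop1 (PySem.Str.splitlines rca) with
  | some v => v
  | none =>
    match pvALoop2 (PySem.Str.splitlines rca) with
    | some v => v
    | none => pvDefaultMsg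

-- ===== PORT B =====
-- single pass with a fallback accumulator (Source B's loop)
def pvBLoop : List String → Option String → String
  | [], fallback => match fallback with | some v => v | none => pvDefaultMsg
  | l :: ls, fallback =>
    let stripped := PySem.Str.strip l
    if PySem.Str.startswith stripped "SPOKEN SUMMARY:" then pvAfterColon l
    else
      pvBLoop ls
        (if fallback.isNone && PySem.Str.startswith stripped "SUMMARY:" then some (pvAfterColon l)
         else fallback)

def extract_spoken_summary_py_alt (rca : String) : String :=
  pvBLoop (PySem.Str.splitlines rca) none

-- ===== PRECONDITION & SPEC =====
def Spec_extract_spoken_summary_py (rca : String) (out : String) : Prop := out = extract_spoken_summary_py_alt rca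
instance (rca : String) (out : String) : Decidable (Spec_extract_spoken_summary_py rca out) := by unfold Spec_extract_spoken_summary_py; infer_instance

-- ===== CLAIM (what is proved, stated in full; the proofs are below) =====
def Claim_equal_extract_spoken_summary_py : Prop := ∀ (rca : String), Dom_extract_spoken_summary_py rca → Spec_extract_spoken_summary_py rca (extract_spoken_summary_py rca)

-- ===== LEMMAS AND PROOFS =====

-- B's one-pass loop computes A's two-scan result, for any pending fallback.
theorem pvBLoop_eq (ls : List String) :
    ∀ fb : Option String,
      pvBLoop ls fb =
        match pvALoop1 ls with
        | some v => v
        | none =>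
          match fb with
          | some v => v
          | none => match pvALoop2 ls with | some v => v | none => pvDefaultMsg := by
  induction ls with
  | nil => intro fb; cases fb <;> simp [pvBLoop, pvALoop1, pvALoop2]
  | cons l ls ih =>
    intro fb
    by_cases h1 : PySem.Chars.startswith (PySem.Chars.strip l.toList)
        ['S', 'P', 'O', 'K', 'E', 'N', ' ', 'S', 'U', 'M', 'M', 'A', 'R', 'Y', ':'] = true
    · simp [pvBLoop, pvALoop1, h1]
    · by_cases h2 : PySem.Chars.startswith (PySem.Chars.strip l.toList)
          ['S', 'U', 'M', 'M', 'A', 'R', 'Y', ':'] = true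
      · cases fb <;> simp [pvBLoop, pvALoop1, pvALoop2, h1, h2, ih]
      · cases fb <;> simp [pvBLoop, pvALoop1, pvALoop2, h1, h2, ih]

-- ===== VERDICT (by name: the statement is the Claim_ definition above) =====
theorem extract_spoken_summary_py_spec : Claim_equal_extract_spoken_summary_py := by
  intro rca _
  unfold Spec_extract_spoken_summary_py extract_spoken_summary_py extract_spoken_summary_py_alt
  rw [pvBLoop_eq]
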